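-- pv_equiv track=rewrite | github.com/KieranM279/SymphonyHub | DiaryStatusImport3.py | getOmega
-- ===== SOURCE A (Python) =====
-- def getOmega(part_diary_dict):
--
--     new_days = ['DU','DAY -10*', 'DAY -9*', 'DAY -8*', 'DAY -7*', 'DAY -6*',
--                 'DAY -5*', 'DAY -4*', 'DAY -3*', 'DAY -2*', 'DAY -1*',
--                 'DAY 0', 'DAY 1', 'DAY 2', 'DAY 3', 'DAY 4', 'DAY 5', 'DAY 6',
--                 'DAY 7', 'DAY 8', 'DAY 9', 'DAY 10', 'DAY 11', 'DAY 12',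
--                 'DAY 13', 'DAY 14', 'DAY 15', 'DAY 16', 'DAY 17', 'DAY 18',
--                 'DAY 19', 'DAY 20', 'DAY 21', 'DAY 22', 'DAY 23', 'DAY 24',
--                 'DAY 25', 'DAY 26', 'DAY 27']
--
--     for i, day in enumerate(reversed(new_days)):
--
--         scores = part_diary_dict[day]
--
--         if(all(isinstance(item, str) for item in scores) and day=='DAY -10*'):
--             end = ''
--             continue
--         elif(all(isinstance(item, str) for item in scores)):
--             continue
--         else:
--             end = day
--             break
--
--     return(end)
-- ===== SOURCE B (Python) =====
-- def getOmega(part_diary_dict):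
--     new_days = ['DU','DAY -10*', 'DAY -9*', 'DAY -8*', 'DAY -7*', 'DAY -6*',
--                 'DAY -5*', 'DAY -4*', 'DAY -3*', 'DAY -2*', 'DAY -1*',
--                 'DAY 0', 'DAY 1', 'DAY 2', 'DAY 3', 'DAY 4', 'DAY 5', 'DAY 6',
--                 'DAY 7', 'DAY 8', 'DAY 9', 'DAY 10', 'DAY 11', 'DAY 12',
--                 'DAY 13', 'DAY 14', 'DAY 15', 'DAY 16', 'DAY 17', 'DAY 18',
--                 'DAY 19', 'DAY 20', 'DAY 21', 'DAY 22', 'DAY 23', 'DAY 24',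
--                 'DAY 25', 'DAY 26', 'DAY 27']
--
--     def last_flagged(days):
--         # last day of `days` whose scores contain a non-string, '' if there is none
--         if not days:
--             return ''
--         day = days[-1]
--         if any(not isinstance(item, str) for item in part_diary_dict[day]):
--             return day
--         return last_flagged(days[:-1])
--
--     return last_flagged(new_days)
-- ===== Notes on version B (the rewrite author's own statement) =====
-- stated objective: alternative
-- what changed: replaces the reversed-enumerate loop with its continue/break state machine, mutable `end` variable and 'DAY -10*' sentinel assignment by a direct structural recursion on the day list from the right that returns the flagged day immediately and '' on the empty list
import Mathlib
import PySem

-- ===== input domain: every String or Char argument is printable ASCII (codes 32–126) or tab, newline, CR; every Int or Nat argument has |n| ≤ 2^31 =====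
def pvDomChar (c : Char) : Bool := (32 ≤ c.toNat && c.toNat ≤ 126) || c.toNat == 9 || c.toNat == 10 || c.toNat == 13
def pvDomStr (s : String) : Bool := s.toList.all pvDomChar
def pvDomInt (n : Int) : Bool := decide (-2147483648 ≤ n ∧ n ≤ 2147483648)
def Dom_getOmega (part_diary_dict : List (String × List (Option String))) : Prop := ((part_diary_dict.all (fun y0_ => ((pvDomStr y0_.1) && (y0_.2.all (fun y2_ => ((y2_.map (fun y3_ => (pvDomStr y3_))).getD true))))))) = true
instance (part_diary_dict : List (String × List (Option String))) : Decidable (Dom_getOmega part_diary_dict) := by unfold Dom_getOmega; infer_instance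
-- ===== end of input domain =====

-- B replaces A's reversed-enumerate loop (break/continue state machine, mutable `end`, a
-- 'DAY -10*' sentinel assignment) by a structural recursion on the day list from the right;
-- objective: alternative. Both raise KeyError on the same missing-day inputs (outside Pre_).


-- the `new_days` list both Pythons write out literally
def pvNewDays : List String :=
  ["DU", "DAY -10*", "DAY -9*", "DAY -8*", "DAY -7*", "DAY -6*",
   "DAY -5*", "DAY -4*", "DAY -3*", "DAY -2*", "DAY -1*",
   "DAY 0", "DAY 1", "DAY 2", "DAY 3", "DAY 4", "DAY 5", "DAY 6",
   "DAY 7", "DAY 8", "DAY 9", "DAY 10", "DAY 11", "DAY 12",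
   "DAY 13", "DAY 14", "DAY 15", "DAY 16", "DAY 17", "DAY 18",
   "DAY 19", "DAY 20", "DAY 21", "DAY 22", "DAY 23", "DAY 24",
   "DAY 25", "DAY 26", "DAY 27"]

-- ===== PORT A =====
-- A's for-loop over reversed(new_days): state `e` is the (possibly unbound) variable `end`;
-- `none` from the lookup = KeyError (excluded by Pre_); `break` returns immediately.
def getOmegaGo (d : List (String × List (Option String))) :
    List String → Option String → Option String
  | [], e => e            -- loop exhausted: return `end` (unbound `end` is excluded by Pre_)
  | day :: rest, e =>
    match List.lookup day d with
    | none => none        -- KeyError, excluded by Pre_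
    | some scores =>
      if scores.all (fun item => item.isSome) && day == "DAY -10*" then
        getOmegaGo d rest (some "")
      else if scores.all (fun item => item.isSome) then
        getOmegaGo d rest e
      else
        some day

def getOmega (part_diary_dict : List (String × List (Option String))) : String :=
  match getOmegaGo part_diary_dict pvNewDays.reverse none with
  | some s => s
  | none => ""            -- unreachable under Pre_

-- ===== PORT B =====
-- B's recursive helper `last_flagged(days)`: `days[-1]` on the non-empty list is its getLast,
-- `days[:-1]` is dropLast (exact on lists); `none` = KeyError from `part_diary_dict[day]`
-- (excluded by Pre_); `some s` = the returned string.
def pvLastFlagged (d : List (String × List (Option String))) (days : List String) :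
    Option String :=
  match days with
  | [] => some ""
  | x :: xs =>
    let day := (x :: xs).getLast (by simp)
    match List.lookup day d with
    | none => none        -- KeyError, excluded by Pre_
    | some scores =>
      if scores.any (fun item => !item.isSome) then some day
      else pvLastFlagged d (x :: xs).dropLast
  termination_by days.length
  decreasing_by simp

def getOmega_alt (part_diary_dict : List (String × List (Option String))) : String :=
  match pvLastFlagged part_diary_dict pvNewDays with
  | some s => s
  | none => ""            -- unreachable under Pre_

-- ===== PRECONDITION & SPEC =====
-- day is present with all-string scores (a day both versions scan past without stopping)
def pvPresentAllStr (d : List (String × List (Option String))) (day : String) : Bool :=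
  (List.lookup day d).isSome && ((List.lookup day d).getD []).all (fun item => item.isSome)

-- Both versions read new_days from the end and stop at the first day that is missing or not
-- all-strings: they raise KeyError exactly when that first stopping day is missing, so Pre_
-- requires it present (Pre_ is exactly the inputs on which A returns normally).
def Pre_getOmega (part_diary_dict : List (String × List (Option String))) : Prop :=
  ((pvNewDays.reverse.find? (fun day => !pvPresentAllStr part_diary_dict day)).all
    (fun day => (List.lookup day part_diary_dict).isSome)) = true
instance (part_diary_dict : List (String × List (Option String))) : Decidable (Pre_getOmega part_diary_dict) := by unfold Pre_getOmega; infer_instance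

def pvWitness_getOmega : (List (String × List (Option String))) :=
  pvNewDays.map (fun day => (day, [some "ok", none]))

def Spec_getOmega (part_diary_dict : List (String × List (Option String))) (out : String) : Prop := out = getOmega_alt part_diary_dict
instance (part_diary_dict : List (String × List (Option String))) (out : String) : Decidable (Spec_getOmega part_diary_dict out) := by unfold Spec_getOmega; infer_instance

-- ===== CLAIM (what is proved, stated in full; the proof is below) =====
def Claim_equal_getOmega : Prop := ∀ (part_diary_dict : List (String × List (Option String))), Dom_getOmega part_diary_dict → Pre_getOmega part_diary_dict → Spec_getOmega part_diary_dict (getOmega part_diary_dict)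

-- ===== LEMMAS AND PROOFS =====

-- one unfolding of B's recursion at a list split off its last element
theorem pvLastFlagged_append (d : List (String × List (Option String)))
    (init : List String) (day : String) :
    pvLastFlagged d (init ++ [day]) =
      match List.lookup day d with
      | none => none
      | some scores =>
        if scores.any (fun item => !item.isSome) then some day
        else pvLastFlagged d init := by
  cases init with
  | nil => simp [pvLastFlagged]
  | cons x xs =>
    rw [List.cons_append, pvLastFlagged]
    simp only [List.getLast_append_singleton, ← List.cons_append, List.dropLast_concat]

-- characterisation of B's recursion: on any `l` whose first stopping day (scanning from the
-- end, if any) is present, it returns the last day of `l` with a non-string score, else `some ""`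
theorem pvLastFlagged_eq (d : List (String × List (Option String))) (l : List String)
    (h : ((l.reverse.find? (fun day => !pvPresentAllStr d day)).all
      (fun day => (List.lookup day d).isSome)) = true) :
    pvLastFlagged d l =
      match l.reverse.find?
          (fun day => ((List.lookup day d).getD []).any (fun item => !item.isSome)) with
      | some day => some day
      | none => some "" := by
  induction l using List.reverseRecOn with
  | nil => simp [pvLastFlagged]
  | append_singleton init day ih =>
    simp only [List.reverse_append, List.reverse_cons, List.reverse_nil, List.nil_append,
      List.singleton_append, List.find?_cons] at h ⊢
    rw [pvLastFlagged_append]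
    cases hp : pvPresentAllStr d day with
    | true =>
      obtain ⟨hsome, hall⟩ := Bool.and_eq_true_iff.mp hp
      obtain ⟨scores, hs⟩ := Option.isSome_iff_exists.mp hsome
      rw [hs, Option.getD_some] at hall
      have hbad : (scores.any fun item => !item.isSome) = false := by
        rw [List.not_all_eq_any_not.symm, hall]; rfl
      rw [hp] at h
      simp only [Bool.not_true, hs, Option.getD_some, hbad, Bool.false_eq_true,
        if_false] at h ⊢
      exact ih h
    | false =>
      rw [hp] at h
      simp only [Bool.not_false, Option.all_some] at h
      obtain ⟨scores, hs⟩ := Option.isSome_iff_exists.mp h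
      have hnall : (scores.all fun item => item.isSome) = false := by
        cases hq : scores.all fun item => item.isSome
        · rfl
        · rw [pvPresentAllStr, hs, Option.getD_some, hq, Option.isSome_some,
            Bool.true_and] at hp
          exact absurd hp (by simp)
      have hbad : (scores.any fun item => !item.isSome) = true := by
        rw [List.not_all_eq_any_not.symm, hnall]; rfl
      simp only [hs, Option.getD_some, hbad, if_true]

-- characterisation of A's loop on any suffix l of the scan whose first stopping day (if any) is
-- present: the first day of l with a non-string score, else `some ""` once 'DAY -10*' has been
-- passed, else the incoming state `e`.
theorem getOmegaGo_eq (d : List (String × List (Option String))) (l : List String)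
    (e : Option String)
    (h : ((l.find? (fun day => !pvPresentAllStr d day)).all
      (fun day => (List.lookup day d).isSome)) = true) :
    getOmegaGo d l e =
      match l.find? (fun day => ((List.lookup day d).getD []).any (fun item => !item.isSome)) with
      | some day => some day
      | none => if "DAY -10*" ∈ l then some "" else e := by
  induction l generalizing e with
  | nil => simp [getOmegaGo]
  | cons day rest ih =>
    rw [List.find?_cons] at h
    rw [List.find?_cons]
    cases hp : pvPresentAllStr d day with
    | true =>
      obtain ⟨hsome, hall⟩ := Bool.and_eq_true_iff.mp hp
      obtain ⟨scores, hs⟩ := Option.isSome_iff_exists.mp hsome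
      rw [hs, Option.getD_some] at hall
      have hbad : (scores.any fun item => !item.isSome) = false := by
        rw [List.not_all_eq_any_not.symm, hall]; rfl
      rw [hp] at h
      simp only [Bool.not_true, getOmegaGo, hs, Option.getD_some, hall, hbad] at h ⊢
      by_cases hd10 : day = "DAY -10*"
      · subst hd10
        simp only [beq_self_eq_true, Bool.and_true, if_true, ih _ h]
        cases List.find? (fun day => ((List.lookup day d).getD []).any
            (fun item => !item.isSome)) rest with
        | some x => rfl
        | none => simp [List.mem_cons]
      · have hbeq : (day == "DAY -10*") = false := by simp [hd10]
        simp only [hbeq, Bool.and_false, if_true, Bool.false_eq_true, if_false, ih _ h]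
        cases List.find? (fun day => ((List.lookup day d).getD []).any
            (fun item => !item.isSome)) rest with
        | some x => rfl
        | none => simp [List.mem_cons, Ne.symm hd10]
    | false =>
      rw [hp] at h
      simp only [Bool.not_false, Option.all_some] at h
      obtain ⟨scores, hs⟩ := Option.isSome_iff_exists.mp h
      have hnall : (scores.all fun item => item.isSome) = false := by
        cases hq : scores.all fun item => item.isSome
        · rfl
        · rw [pvPresentAllStr, hs, Option.getD_some, hq, Option.isSome_some,
            Bool.true_and] at hp
          exact absurd hp (by simp)
      have hbad : (scores.any fun item => !item.isSome) = true := by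
        rw [List.not_all_eq_any_not.symm, hnall]; rfl
      simp only [getOmegaGo, hs, Option.getD_some, hbad, hnall, Bool.false_and,
        Bool.false_eq_true, if_false]

-- ===== VERDICT (by name: the statement is the Claim_ definition above) =====
theorem getOmega_spec : Claim_equal_getOmega := by
  intro d _ hpre
  unfold Spec_getOmega getOmega getOmega_alt
  rw [getOmegaGo_eq d _ none hpre, pvLastFlagged_eq d _ hpre]
  have hmem : "DAY -10*" ∈ pvNewDays.reverse := by decide
  cases pvNewDays.reverse.find?
      (fun day => ((List.lookup day d).getD []).any (fun item => !item.isSome)) with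
  | none => simp [hmem]
  | some day => rfl
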